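-- pv_equiv track=rewrite | github.com/lancelote/advent_of_code | src/year2017/day09a.py | solve
-- ===== SOURCE A (Python) =====
-- def solve(task: str) -> int:
--     """Count total group score."""
--     score = 0
--     total = 0
--     garbage = False
--     escape = False
--
--     for token in task.strip():
--         if escape:
--             escape = False
--         elif token == ">":
--             garbage = False
--         elif token == "!":
--             escape = True
--         elif garbage:
--             pass
--         elif token == "{":
--             score += 1
--             total += score
--         elif token == "}":
--             score -= 1
--         elif token == "<":
--             garbage = True
--     return total
-- ===== SOURCE B (Python) =====
-- def solve(task: str) -> int:
--     """Count total group score."""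
--     s = task.strip()
--     n = len(s)
--     score = 0
--     total = 0
--     i = 0
--     while i < n:
--         c = s[i]
--         if c == '!':
--             i += 2
--         elif c == '{':
--             score += 1
--             total += score
--             i += 1
--         elif c == '}':
--             score -= 1
--             i += 1
--         elif c == '<':
--             i += 1
--             while i < n:
--                 if s[i] == '!':
--                     i += 2
--                 elif s[i] == '>':
--                     i += 1
--                     break
--                 else:
--                     i += 1
--         else:
--             i += 1
--     return total
-- ===== Notes on version B (the rewrite author's own statement) =====
-- stated objective: alternative
-- what changed: Replaced the single flag-driven for-loop (garbage/escape booleans) with an explicit-index while loop whose garbage handling is a nested inner loop, eliminating both state flags.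
import Mathlib
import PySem

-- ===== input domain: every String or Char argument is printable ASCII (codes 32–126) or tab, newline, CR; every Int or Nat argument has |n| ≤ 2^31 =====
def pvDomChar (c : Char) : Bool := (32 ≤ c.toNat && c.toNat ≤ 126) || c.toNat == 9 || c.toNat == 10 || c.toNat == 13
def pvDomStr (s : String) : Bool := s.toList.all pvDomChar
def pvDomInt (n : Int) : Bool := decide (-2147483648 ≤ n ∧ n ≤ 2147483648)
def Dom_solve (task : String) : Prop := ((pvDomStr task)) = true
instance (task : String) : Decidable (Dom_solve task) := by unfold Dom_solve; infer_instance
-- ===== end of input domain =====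

-- B replaces A's flag-driven scan by an explicit-index scan with a nested garbage loop (alternative decomposition, same O(n) cost).

-- ===== PORT A =====
-- state = (score, total, garbage, escape), exactly A's four variables
def solveStep (st : Int × Int × Bool × Bool) (token : Char) : Int × Int × Bool × Bool :=
  match st with
  | (score, total, garbage, escape) =>
    if escape then (score, total, garbage, false)
    else if token = '>' then (score, total, false, escape)
    else if token = '!' then (score, total, garbage, true)
    else if garbage then (score, total, garbage, escape)
    else if token = '{' then (score + 1, total + (score + 1), garbage, escape)
    else if token = '}' then (score - 1, total, garbage, escape)
    else if token = '<' then (score, total, true, escape)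
    else (score, total, garbage, escape)

def solve (task : String) : Int :=
  ((PySem.Str.strip task).toList.foldl solveStep (0, 0, false, false)).2.1

-- ===== PORT B =====
-- B's inner `while` loop: consume garbage, return the remaining suffix (the index advance)
def skipGarbage : List Char → List Char
  | [] => []
  | c :: rest =>
    if c = '!' then skipGarbage (rest.drop 1)
    else if c = '>' then rest
    else skipGarbage rest
termination_by cs => cs.length
decreasing_by
  all_goals simp <;> omega

theorem skipGarbage_length_le : ∀ cs : List Char, (skipGarbage cs).length ≤ cs.length
  | [] => by simp [skipGarbage]
  | c :: rest => by
    by_cases h : c = '!'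
    · have ih := skipGarbage_length_le (rest.drop 1)
      simp only [skipGarbage, if_pos h, List.length_cons, List.length_drop] at *
      omega
    · by_cases h2 : c = '>'
      · simp [skipGarbage, h, h2]
      · have ih := skipGarbage_length_le rest
        simp only [skipGarbage, if_neg h, if_neg h2, List.length_cons]
        omega
termination_by cs => cs.length
decreasing_by
  all_goals simp <;> omega

-- B's outer `while` loop over the suffix starting at index i
def solveGo : List Char → Int → Int → Int
  | [], _, total => total
  | c :: rest, score, total =>
    if c = '!' then solveGo (rest.drop 1) score total
    else if c = '{' then solveGo rest (score + 1) (total + (score + 1))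
    else if c = '}' then solveGo rest (score - 1) total
    else if c = '<' then solveGo (skipGarbage rest) score total
    else solveGo rest score total
termination_by cs => cs.length
decreasing_by
  all_goals first
    | exact Nat.lt_succ_of_le (skipGarbage_length_le rest)
    | (simp <;> omega)

def solve_alt (task : String) : Int :=
  solveGo (PySem.Str.strip task).toList 0 0

-- ===== PRECONDITION & SPEC =====
def Spec_solve (task : String) (out : Int) : Prop := out = solve_alt task
instance (task : String) (out : Int) : Decidable (Spec_solve task out) := by unfold Spec_solve; infer_instance

-- ===== CLAIM (what is proved, stated in full; the proofs are below) =====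
def Claim_equal_solve : Prop := ∀ (task : String), Dom_solve task → Spec_solve task (solve task)

-- ===== LEMMAS AND PROOFS =====

-- escape=true: A clears the flag on the next char, i.e. drops one char
theorem foldl_escape (cs : List Char) (s t : Int) (g : Bool) :
    (cs.foldl solveStep (s, t, g, true)).2.1
      = ((cs.drop 1).foldl solveStep (s, t, g, false)).2.1 := by
  cases cs with
  | nil => simp
  | cons c rest => simp [solveStep]

-- main invariant: the fold from a non-escape state computes solveGo / solveGo ∘ skipGarbage
theorem fold_eq (n : ℕ) : ∀ cs : List Char, cs.length ≤ n → ∀ s t : Int,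
    ((cs.foldl solveStep (s, t, false, false)).2.1 = solveGo cs s t ∧
     (cs.foldl solveStep (s, t, true, false)).2.1 = solveGo (skipGarbage cs) s t) := by
  induction n with
  | zero =>
    intro cs h s t
    have hnil : cs = [] := List.eq_nil_of_length_eq_zero (Nat.le_zero.mp h)
    subst hnil
    simp [solveGo, skipGarbage]
  | succ n ih =>
    intro cs h s t
    cases cs with
    | nil => simp [solveGo, skipGarbage]
    | cons c rest =>
      simp only [List.length_cons, Nat.succ_le_succ_iff] at h
      have hdrop : (rest.drop 1).length ≤ n := by
        have := List.length_drop (l := rest) (i := 1); omega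
      constructor
      · -- top-level state
        by_cases h1 : c = '>'
        · subst h1
          simp only [List.foldl_cons, solveStep, solveGo]
          norm_num
          exact (ih rest h s t).1
        by_cases h2 : c = '!'
        · subst h2
          simp only [List.foldl_cons, solveStep, solveGo]
          norm_num
          rw [if_neg (show ¬('!' : Char) = '>' by decide), foldl_escape]
          simpa [List.drop_one] using (ih (rest.drop 1) hdrop s t).1
        by_cases h3 : c = '{'
        · subst h3
          simp only [List.foldl_cons, solveStep, solveGo]
          norm_num
          exact (ih rest h (s + 1) (t + (s + 1))).1
        by_cases h4 : c = '}'
        · subst h4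
          simp only [List.foldl_cons, solveStep, solveGo]
          norm_num
          exact (ih rest h (s - 1) t).1
        by_cases h5 : c = '<'
        · subst h5
          simp only [List.foldl_cons, solveStep, solveGo]
          norm_num
          exact (ih rest h s t).2
        · simp only [List.foldl_cons, solveStep, solveGo]
          simp only [if_neg h1, if_neg h2, if_neg h3, if_neg h4, if_neg h5, Bool.false_eq_true,
            if_false]
          exact (ih rest h s t).1
      · -- garbage state
        by_cases h1 : c = '>'
        · subst h1
          simp only [List.foldl_cons, solveStep, skipGarbage]
          norm_num
          exact (ih rest h s t).1
        by_cases h2 : c = '!'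
        · subst h2
          simp only [List.foldl_cons, solveStep, skipGarbage]
          norm_num
          rw [if_neg (show ¬('!' : Char) = '>' by decide), foldl_escape]
          simpa [List.drop_one] using (ih (rest.drop 1) hdrop s t).2
        · simp only [List.foldl_cons, solveStep, skipGarbage]
          simp only [if_neg h1, if_neg h2, if_true, Bool.false_eq_true, if_false]
          exact (ih rest h s t).2

-- ===== VERDICT (by name: the statement is the Claim_ definition above) =====
theorem solve_spec : Claim_equal_solve := by
  intro task _
  unfold Spec_solve solve solve_alt
  exact (fold_eq (PySem.Str.strip task).toList.length _ le_rfl 0 0).1
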